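-- pv_equiv track=rewrite | github.com/costypetrisor/AoC_2018 | day_17/pb01.py | count_grid
-- ===== SOURCE A (Python) =====
-- def count_grid(grid):
--     width, height = len(grid[0]), len(grid)
--     open_count = trees_count = lumberyards_count = 0
--     for row_idx in range(height):
--         for col_idx in range(width):
--             current_land = grid[row_idx][col_idx]
--             if current_land == '.':
--                 open_count += 1
--             elif current_land == '|':
--                 trees_count += 1
--             elif current_land == '#':
--                 lumberyards_count += 1
--     return (open_count, trees_count, lumberyards_count)
-- ===== SOURCE B (Python) =====
-- def count_grid(grid):
--     width = len(grid[0])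
--     cells = [cell for row in grid for cell in row[:width]]
--     return (cells.count('.'), cells.count('|'), cells.count('#'))
-- ===== Notes on version B (the rewrite author's own statement) =====
-- stated objective: idiomatic
-- what changed: Replaces the nested index loops with three accumulators and an if/elif dispatch by flattening the first `width` cells of every row into one list and reading the three answers off with three list.count passes.
import Mathlib
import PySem

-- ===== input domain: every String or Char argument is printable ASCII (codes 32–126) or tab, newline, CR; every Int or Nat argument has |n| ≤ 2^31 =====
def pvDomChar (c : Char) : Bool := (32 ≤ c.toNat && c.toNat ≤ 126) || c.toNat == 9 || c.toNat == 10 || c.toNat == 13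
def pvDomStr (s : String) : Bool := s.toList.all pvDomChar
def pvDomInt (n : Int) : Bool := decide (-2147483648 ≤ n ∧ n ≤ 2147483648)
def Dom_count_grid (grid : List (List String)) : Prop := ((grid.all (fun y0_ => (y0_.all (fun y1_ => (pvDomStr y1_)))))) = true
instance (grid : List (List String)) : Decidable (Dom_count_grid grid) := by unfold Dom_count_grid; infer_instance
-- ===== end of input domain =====

-- B replaces the nested index loops with three accumulators by one flattened cell list read by three count passes (idiomatic; same cost).

-- ===== PORT A =====
-- the if/elif dispatch of A's inner loop body
def pvStepA (acc : Int × Int × Int) (cell : String) : Int × Int × Int :=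
  if cell = "." then (acc.1 + 1, acc.2.1, acc.2.2)
  else if cell = "|" then (acc.1, acc.2.1 + 1, acc.2.2)
  else if cell = "#" then (acc.1, acc.2.1, acc.2.2 + 1)
  else acc

def count_grid (grid : List (List String)) : Int × Int × Int :=
  match grid with
  | [] => (0, 0, 0)  -- Python raises IndexError at grid[0] (outside Pre_)
  | row0 :: _ =>
    let width := row0.length
    let height := grid.length
    (List.range height).foldl (fun acc row_idx =>
      (List.range width).foldl (fun acc col_idx =>
        -- grid[row_idx][col_idx]; the getD defaults are unreachable under Pre_
        pvStepA acc ((grid.getD row_idx []).getD col_idx "")) acc) (0, 0, 0)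

-- ===== PORT B =====
def count_grid_alt (grid : List (List String)) : Int × Int × Int :=
  match grid with
  | [] => (0, 0, 0)  -- Python raises IndexError at grid[0] (outside Pre_)
  | row0 :: _ =>
    let cells := grid.flatMap (fun row => row.take row0.length)  -- row[:width], width = len(grid[0]) ≥ 0
    ((cells.count "." : Int), (cells.count "|" : Int), (cells.count "#" : Int))

-- ===== PRECONDITION & SPEC =====
-- Pre_ excludes exactly the inputs where A raises IndexError: the empty grid, and grids with a row shorter than the first row.
def Pre_count_grid (grid : List (List String)) : Prop :=
  grid ≠ [] ∧ ∀ row ∈ grid, (grid.headD []).length ≤ row.length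
instance (grid : List (List String)) : Decidable (Pre_count_grid grid) := by unfold Pre_count_grid; infer_instance
def pvWitness_count_grid : List (List String) := [[".", "|"], ["#", "x"]]

def Spec_count_grid (grid : List (List String)) (out : Int × Int × Int) : Prop := out = count_grid_alt grid
instance (grid : List (List String)) (out : Int × Int × Int) : Decidable (Spec_count_grid grid out) := by unfold Spec_count_grid; infer_instance

-- ===== CLAIM (what is proved, stated in full; the proofs are below) =====
def Claim_equal_count_grid : Prop := ∀ (grid : List (List String)), Dom_count_grid grid → Pre_count_grid grid → Spec_count_grid grid (count_grid grid)

-- ===== LEMMAS AND PROOFS =====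

/-- A fold over `range w` reading `l.getD` equals the fold over `l.take w`, when `w ≤ l.length`. -/
theorem foldl_range_getD {α β : Type} (g : β → α → β) (d : α) :
    ∀ (w : Nat) (l : List α) (acc : β), w ≤ l.length →
      (List.range w).foldl (fun a c => g a (l.getD c d)) acc = (l.take w).foldl g acc := by
  intro w
  induction w with
  | zero => intro l acc _; simp
  | succ n ih =>
    intro l acc h
    have hn : n < l.length := Nat.lt_of_lt_of_le (Nat.lt_succ_self n) h
    have ht : l.take (n + 1) = l.take n ++ [l[n]] := by
      rw [List.take_add_one, List.getElem?_eq_getElem hn]; rfl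
    rw [List.range_succ, List.foldl_append, ih l acc (Nat.le_of_lt hn), ht, List.foldl_append]
    simp [List.getD, List.getElem?_eq_getElem hn]

/-- Folding A's dispatch over a cell list adds the three counts to the accumulator. -/
theorem foldl_stepA_count :
    ∀ (cells : List String) (a b c : Int),
      cells.foldl pvStepA (a, b, c) =
        (a + (cells.count "." : Int), b + (cells.count "|" : Int), c + (cells.count "#" : Int)) := by
  intro cells
  induction cells with
  | nil => intro a b c; simp
  | cons x xs ih =>
    intro a b c
    simp only [List.foldl_cons, pvStepA, List.count_cons]
    split_ifs with h1 h2 h3 <;> simp_all <;> ring_nf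

theorem count_grid_spec' (grid : List (List String)) (hpre : Pre_count_grid grid) :
    count_grid grid = count_grid_alt grid := by
  obtain ⟨hne, hrows⟩ := hpre
  match grid, hne with
  | row0 :: rest, _ =>
    have hrows' : ∀ row ∈ row0 :: rest, row0.length ≤ row.length := by
      intro row hm; simpa using hrows row hm
    simp only [count_grid, count_grid_alt]
    trans ((row0 :: rest).foldl
        (fun acc row => (List.range row0.length).foldl (fun a c => pvStepA a (row.getD c "")) acc)
        ((0, 0, 0) : Int × Int × Int))
    · -- outer loop: fold over range (height) reading getD = fold over the row list itself
      simpa using foldl_range_getD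
        (fun (acc : Int × Int × Int) (row : List String) =>
          (List.range row0.length).foldl (fun a c => pvStepA a (row.getD c "")) acc)
        ([] : List String) (row0 :: rest).length (row0 :: rest) ((0, 0, 0) : Int × Int × Int)
        (Nat.le_refl _)
    trans ((row0 :: rest).foldl (fun acc row => (row.take row0.length).foldl pvStepA acc)
        ((0, 0, 0) : Int × Int × Int))
    · -- inner loop: fold over range (width) reading getD = fold over row.take width
      apply PySem.List.foldl_congr_mem
      intro acc row hm
      exact foldl_range_getD pvStepA "" row0.length row acc (hrows' row hm)
    trans (((row0 :: rest).flatMap (fun row => row.take row0.length)).foldl pvStepA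
        ((0, 0, 0) : Int × Int × Int))
    · exact (List.foldl_flatMap).symm
    · rw [foldl_stepA_count _ 0 0 0]
      simp

-- ===== VERDICT (by name: the statement is the Claim_ definition above) =====
theorem count_grid_spec : Claim_equal_count_grid := by
  intro grid _ hpre
  exact count_grid_spec' grid hpre
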